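-- pv_equiv track=rewrite | github.com/jtorske/RebalanceAI | server/main.py | _is_valid_quote_symbol
-- ===== SOURCE A (Python) =====
-- def _is_valid_quote_symbol(raw_symbol: str) -> bool:
--     symbol = raw_symbol.strip().upper()
--     if not symbol:
--         return False
--
--     for character in symbol:
--         if character not in "ABCDEFGHIJKLMNOPQRSTUVWXYZ.-":
--             return False
--
--     return 1 <= len(symbol) <= 10
-- ===== SOURCE B (Python) =====
-- import re
--
-- def _is_valid_quote_symbol(raw_symbol: str) -> bool:
--     symbol = raw_symbol.strip().upper()
--     return re.fullmatch(r'[A-Z.\-]{1,10}', symbol) is not None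
-- ===== Notes on version B (the rewrite author's own statement) =====
-- stated objective: idiomatic
-- what changed: The explicit per-character loop with early return plus the separate emptiness and length checks are replaced by a single re.fullmatch against [A-Z.\-]{1,10}, whose character class and quantifier encode the allowed set and the 1..10 length bound. (constant-factor speedup: the match runs in CPython's C regex engine instead of a Python-level loop)
import Mathlib
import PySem

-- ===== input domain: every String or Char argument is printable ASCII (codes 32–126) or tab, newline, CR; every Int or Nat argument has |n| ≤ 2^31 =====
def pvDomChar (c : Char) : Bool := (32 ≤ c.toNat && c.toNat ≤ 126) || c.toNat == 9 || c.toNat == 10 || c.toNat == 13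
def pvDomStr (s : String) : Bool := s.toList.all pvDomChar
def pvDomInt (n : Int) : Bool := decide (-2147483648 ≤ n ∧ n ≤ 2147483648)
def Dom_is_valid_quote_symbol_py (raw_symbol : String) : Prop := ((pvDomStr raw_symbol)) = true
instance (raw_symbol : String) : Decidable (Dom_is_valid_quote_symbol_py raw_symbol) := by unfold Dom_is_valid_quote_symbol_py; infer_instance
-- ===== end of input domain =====

-- B replaces A's per-character loop + separate length check by one regex fullmatch
-- (re.fullmatch(r'[A-Z.\-]{1,10}', symbol)); objective: idiomatic.

-- ===== PORT A =====
-- the Python string constant "ABCDEFGHIJKLMNOPQRSTUVWXYZ.-" as its character list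
def pyAllowed : List Char :=
  ['A','B','C','D','E','F','G','H','I','J','K','L','M','N','O','P','Q','R','S','T','U','V','W','X','Y','Z','.','-']

-- A's 'for character in symbol' loop: early-return False on a bad character, else fall through
-- to 'return 1 <= len(symbol) <= 10'.  'character not in <string>' for a single character is
-- exactly list membership, ported as List.contains.
def aScan (symbol : List Char) : List Char → Bool
  | [] => decide (1 ≤ symbol.length ∧ symbol.length ≤ 10)
  | c :: rest => if pyAllowed.contains c then aScan symbol rest else false

def is_valid_quote_symbol_py (raw_symbol : String) : Bool :=
  let symbol := PySem.Chars.upper (PySem.Chars.strip raw_symbol.toList)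
  if symbol.isEmpty then false
  else aScan symbol symbol

-- ===== PORT B =====
-- the regex character class [A-Z.\-]
def symClass (c : Char) : Bool := ('A' ≤ c && c ≤ 'Z') || c == '.' || c == '-'

def is_valid_quote_symbol_py_alt (raw_symbol : String) : Bool :=
  let symbol := PySem.Chars.upper (PySem.Chars.strip raw_symbol.toList)
  -- re.fullmatch(r'[A-Z.\-]{1,10}', symbol) is not None, ported as the denotation of this fixed
  -- regex (PySem has no regex engine): the whole string is 1..10 characters of the class [A-Z.\-]
  decide (1 ≤ symbol.length ∧ symbol.length ≤ 10) && symbol.all symClass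

-- ===== PRECONDITION & SPEC =====
def Spec_is_valid_quote_symbol_py (raw_symbol : String) (out : Bool) : Prop := out = is_valid_quote_symbol_py_alt raw_symbol
instance (raw_symbol : String) (out : Bool) : Decidable (Spec_is_valid_quote_symbol_py raw_symbol out) := by unfold Spec_is_valid_quote_symbol_py; infer_instance

-- ===== CLAIM (what is proved, stated in full; the proofs are below) =====
def Claim_equal_is_valid_quote_symbol_py : Prop := ∀ (raw_symbol : String), Dom_is_valid_quote_symbol_py raw_symbol → Spec_is_valid_quote_symbol_py raw_symbol (is_valid_quote_symbol_py raw_symbol)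

-- ===== LEMMAS AND PROOFS =====

-- membership in A's allowed-character string coincides with B's regex character class
set_option maxRecDepth 8192 in
theorem contains_eq_symClass (c : Char) : pyAllowed.contains c = symClass c := by
  rcases c with ⟨⟨⟨n, hn⟩⟩, hv⟩
  rw [Bool.eq_iff_iff]
  simp only [pyAllowed, symClass, List.contains_eq_mem, List.mem_cons, List.not_mem_nil, or_false,
    decide_eq_true_eq, Bool.or_eq_true, Bool.and_eq_true, beq_iff_eq, Char.le_def,
    Char.ext_iff, UInt32.le_iff_toBitVec_le, UInt32.ext_iff, BitVec.le_def]
  simp only [Char.reduceVal, UInt32.toNat, BitVec.toNat,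
    ]
  norm_num
  omega

-- A's scan over any suffix = B's 'all' over that suffix, conjoined with the length check
theorem aScan_eq (s : List Char) :
    ∀ rest : List Char,
      aScan s rest = (rest.all symClass && decide (1 ≤ s.length ∧ s.length ≤ 10)) := by
  intro rest
  induction rest with
  | nil => simp [aScan]
  | cons c cs ih =>
      simp only [aScan, List.all_cons, contains_eq_symClass]
      cases h : symClass c <;> simp [ih]

-- ===== VERDICT (by name: the statement is the Claim_ definition above) =====
theorem is_valid_quote_symbol_py_spec : Claim_equal_is_valid_quote_symbol_py := by
  intro raw_symbol _
  unfold Spec_is_valid_quote_symbol_py is_valid_quote_symbol_py is_valid_quote_symbol_py_alt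
  set s := PySem.Chars.upper (PySem.Chars.strip raw_symbol.toList) with hs
  cases h : s.isEmpty
  · simp only [h, aScan_eq, Bool.and_comm, if_neg Bool.false_ne_true]
  · have : s = [] := List.isEmpty_iff.mp h
    simp [this]
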